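-- pv_equiv track=rewrite | github.com/AndreyZyuzin/sprints_exercises | 13 sprint/e13_O.py | update_destances
-- ===== SOURCE A (Python) =====
-- def update_destances(counter: dict, k_dist: int):
--     """Определение значение первых k_dist минимальных чисел."""
--     keys = (sorted(counter.keys()))
--     k_key = 0
--     while True:
--         key_pred = keys[k_key]
--         value_pred = counter[key_pred]
--         k_key += 1
--         if k_dist <= value_pred:
--             result = key_pred
--             break
--         key_next = keys[k_key]
--         k_dist -= value_pred
--     while k_key < len(keys):
--         del counter[keys[k_key]]
--         k_key += 1
--     return result
-- ===== SOURCE B (Python) =====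
-- def update_destances(counter: dict, k_dist: int):
--     """Определение значение первых k_dist минимальных чисел."""
--     result = min(k for k, v in counter.items()
--                  if k_dist <= sum(v2 for k2, v2 in counter.items() if k2 <= k))
--     for key in [k for k in counter if result < k]:
--         del counter[key]
--     return result
-- ===== Notes on version B (the rewrite author's own statement) =====
-- stated objective: alternative
-- what changed: B replaces A's sort-then-cumulative-walk (with index bookkeeping over the sorted key list) by a direct order-free characterisation: it takes min over all keys whose at-most-that-key value total reaches k_dist, with no sorting and no running subtraction.
import Mathlib
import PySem

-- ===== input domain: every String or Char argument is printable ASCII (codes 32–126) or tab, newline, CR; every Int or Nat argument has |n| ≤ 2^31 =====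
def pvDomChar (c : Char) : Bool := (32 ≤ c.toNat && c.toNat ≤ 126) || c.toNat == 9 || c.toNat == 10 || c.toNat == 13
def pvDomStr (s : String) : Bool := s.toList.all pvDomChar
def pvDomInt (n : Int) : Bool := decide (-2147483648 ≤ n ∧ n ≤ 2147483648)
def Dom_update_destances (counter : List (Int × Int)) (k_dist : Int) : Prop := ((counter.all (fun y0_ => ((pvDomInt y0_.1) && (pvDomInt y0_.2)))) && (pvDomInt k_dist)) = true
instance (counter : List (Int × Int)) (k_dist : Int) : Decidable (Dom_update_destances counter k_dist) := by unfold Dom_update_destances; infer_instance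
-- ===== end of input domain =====

-- B walks the same dict a different way (min over a predicate instead of sort + cumulative walk);
-- both A and B also delete the keys larger than the result from `counter` in place (same mutation);
-- the equivalence proved here is about the return value.

-- ===== PORT A =====
-- the `while True` loop of A: index k_key into the sorted key list, counter lookup,
-- running subtraction from k_dist; `none` = the IndexError/KeyError paths of the Python.
-- fuel bounds the unbounded while-loop; `keys.length + 1` is enough since k_key grows each pass.
def udA_loop (keys : List Int) (counter : List (Int × Int)) (k_key : Nat) (k_dist : Int) : Nat → Option Int
  | 0 => none
  | fuel + 1 =>
    match PySem.List.pyGet? keys (k_key : Int) with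
    | none => none                                   -- keys[k_key] IndexError
    | some key_pred =>
      match List.lookup key_pred counter with
      | none => none                                 -- counter[key_pred] KeyError
      | some value_pred =>
        if k_dist ≤ value_pred then some key_pred    -- result = key_pred; break
        else
          match PySem.List.pyGet? keys ((k_key : Int) + 1) with
          | none => none                             -- key_next = keys[k_key] IndexError
          | some _ => udA_loop keys counter (k_key + 1) (k_dist - value_pred) fuel

-- the second while-loop of A only mutates `counter`; the returned value is `result`.
def update_destances (counter : List (Int × Int)) (k_dist : Int) : Int :=
  let keys := PySem.List.sorted (counter.map Prod.fst) (fun x => x) false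
  (udA_loop keys counter 0 k_dist (keys.length + 1)).getD 0

-- ===== PORT B =====
-- sum(v2 for k2, v2 in counter.items() if k2 <= k)
def udB_sumLe (counter : List (Int × Int)) (k : Int) : Int :=
  ((counter.filter (fun q => decide (q.1 ≤ k))).map Prod.snd).sum

-- min(k for k, v in counter.items() if k_dist <= sum(...)); the deletion loop only mutates.
def update_destances_alt (counter : List (Int × Int)) (k_dist : Int) : Int :=
  (PySem.List.min?
      ((counter.filter (fun p => decide (k_dist ≤ udB_sumLe counter p.1))).map Prod.fst)
      (fun x => x)).getD 0

-- ===== PRECONDITION & SPEC =====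
-- Pre_ keeps the dict invariant (distinct keys — duplicate keys cannot occur in the Python dict
-- this list stands for) and excludes the inputs where A raises IndexError (k_dist exceeded by no
-- cumulative value total); B raises ValueError (min of empty) on exactly those inputs.
def Pre_update_destances (counter : List (Int × Int)) (k_dist : Int) : Prop :=
  (counter.map Prod.fst).Nodup ∧
  ∃ p ∈ counter, k_dist ≤ ((counter.filter (fun q => decide (q.1 ≤ p.1))).map Prod.snd).sum
instance (counter : List (Int × Int)) (k_dist : Int) : Decidable (Pre_update_destances counter k_dist) := by
  unfold Pre_update_destances; infer_instance

def pvWitness_update_destances : (List (Int × Int)) × Int := ([(3, 2), (1, 1), (5, 4)], 3)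

def Spec_update_destances (counter : List (Int × Int)) (k_dist : Int) (out : Int) : Prop := out = update_destances_alt counter k_dist
instance (counter : List (Int × Int)) (k_dist : Int) (out : Int) : Decidable (Spec_update_destances counter k_dist out) := by unfold Spec_update_destances; infer_instance

-- ===== CLAIM (what is proved, stated in full; the proofs are below) =====
def Claim_equal_update_destances : Prop := ∀ (counter : List (Int × Int)) (k_dist : Int), Dom_update_destances counter k_dist → Pre_update_destances counter k_dist → Spec_update_destances counter k_dist (update_destances counter k_dist)

-- ===== LEMMAS AND PROOFS =====

-- the loop of A, rephrased structurally as a walk over the remaining suffix of the sorted key list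
def udWalk (counter : List (Int × Int)) : List Int → Int → Option Int
  | [], _ => none
  | k :: ks, d =>
    match List.lookup k counter with
    | none => none
    | some v => if d ≤ v then some k else udWalk counter ks (d - v)

-- lookup succeeds for every key occurring in the association list
lemma ud_lookup_isSome (l : List (Int × Int)) (a : Int) (h : a ∈ l.map Prod.fst) :
    ∃ v, List.lookup a l = some v := by
  induction l with
  | nil => simp at h
  | cons x t ih =>
    by_cases hx : a = x.1
    · exact ⟨x.2, by simp [List.lookup, hx]⟩
    · have hm : a ∈ t.map Prod.fst := by simpa [hx] using h
      obtain ⟨v, hv⟩ := ih hm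
      exact ⟨v, by simp [List.lookup, hv, beq_eq_false_iff_ne.mpr hx]⟩

-- A's while-loop equals the structural walk, for any sufficient fuel
lemma udA_loop_eq_walk (keys : List Int) (counter : List (Int × Int)) :
    ∀ (fuel k_key : Nat) (d : Int), keys.length - k_key < fuel →
      udA_loop keys counter k_key d fuel = udWalk counter (keys.drop k_key) d := by
  intro fuel
  induction fuel with
  | zero => intro k_key d h; omega
  | succ fuel ih =>
    intro k_key d h
    by_cases hk : k_key < keys.length
    · have hdrop : keys.drop k_key = keys[k_key] :: keys.drop (k_key + 1) :=
        List.drop_eq_getElem_cons hk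
      have hget : PySem.List.pyGet? keys (k_key : Int) = some keys[k_key] := by
        simp [List.getElem?_eq_getElem hk]
      rw [hdrop]
      rw [udA_loop, hget]
      cases hlook : List.lookup keys[k_key] counter with
      | none => simp [udWalk, hlook]
      | some v =>
        by_cases hle : d ≤ v
        · simp [udWalk, hlook, hle]
        · have htn : ((k_key : Int) + 1).toNat = k_key + 1 := by omega
          by_cases hnext : k_key + 1 < keys.length
          · have hget2 : PySem.List.pyGet? keys ((k_key : Int) + 1) = some keys[k_key + 1] := by
              rw [PySem.List.pyGet?_of_nonneg keys (by omega), htn, List.getElem?_eq_getElem hnext]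
            rw [hget2]
            simp only [udWalk, hlook, if_neg hle]
            exact ih (k_key + 1) (d - v) (by omega)
          · have hget2 : PySem.List.pyGet? keys ((k_key : Int) + 1) = none := by
              rw [PySem.List.pyGet?_of_nonneg keys (by omega), htn,
                List.getElem?_eq_none (by omega : keys.length ≤ k_key + 1)]
            rw [hget2]
            have hdrop2 : keys.drop (k_key + 1) = [] := List.drop_eq_nil_of_le (by omega)
            simp [udWalk, hlook, hle, hdrop2]
    · have hdrop : keys.drop k_key = [] := List.drop_eq_nil_of_le (by omega)
      have hget : PySem.List.pyGet? keys (k_key : Int) = none := by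
        simp [List.getElem?_eq_none (by omega : keys.length ≤ k_key)]
      rw [udA_loop, hget, hdrop]
      rfl

-- the walk over a strictly increasing key list is the first key whose
-- within-the-list "values of keys up to it" total reaches d
lemma udWalk_eq_head (counter : List (Int × Int)) (v : Int → Int) :
    ∀ (ks : List Int) (d : Int), ks.Pairwise (· < ·) →
      (∀ k ∈ ks, List.lookup k counter = some (v k)) →
      udWalk counter ks d =
        (ks.filter (fun k => decide (d ≤ ((ks.filter (fun x => decide (x ≤ k))).map v).sum))).head? := by
  intro ks
  induction ks with
  | nil => intro d _ _; rfl
  | cons k0 kt ih =>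
    intro d hpw hlook
    have hk0lt : ∀ x ∈ kt, k0 < x := fun x hx => (List.pairwise_cons.mp hpw).1 x hx
    have hS0 : ((List.filter (fun x => decide (x ≤ k0)) (k0 :: kt)).map v).sum = v k0 := by
      have hnil : kt.filter (fun x => decide (x ≤ k0)) = [] := by
        rw [List.filter_eq_nil_iff]
        intro x hx
        simpa using not_le.mpr (hk0lt x hx)
      simp [hnil]
    have hSk : ∀ k ∈ kt,
        ((List.filter (fun x => decide (x ≤ k)) (k0 :: kt)).map v).sum
          = v k0 + ((kt.filter (fun x => decide (x ≤ k))).map v).sum := by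
      intro k hk
      have : k0 ≤ k := le_of_lt (hk0lt k hk)
      simp [this]
    have hl0 := hlook k0 (List.mem_cons_self)
    by_cases hle : d ≤ v k0
    · rw [List.filter_cons_of_pos (by rw [hS0]; exact decide_eq_true hle)]
      simp only [udWalk, hl0, if_pos hle, List.head?_cons]
    · have hcongr : kt.filter
            (fun k => decide (d ≤ ((List.filter (fun x => decide (x ≤ k)) (k0 :: kt)).map v).sum))
          = kt.filter
            (fun k => decide (d - v k0 ≤ ((kt.filter (fun x => decide (x ≤ k))).map v).sum)) := by
        apply List.filter_congr
        intro k hk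
        rw [hSk k hk]
        by_cases h : d - v k0 ≤ ((kt.filter (fun x => decide (x ≤ k))).map v).sum
        · rw [decide_eq_true (by omega), decide_eq_true h]
        · rw [decide_eq_false (by omega), decide_eq_false h]
      rw [List.filter_cons_of_neg (by rw [hS0]; simpa using hle), hcongr]
      simp only [udWalk, hl0, if_neg hle]
      exact ih (d - v k0) (List.pairwise_cons.mp hpw).2
        (fun k hk => hlook k (List.mem_cons_of_mem _ hk))

-- B's within-counter sum equals the within-key-list sum of looked-up values, for distinct keys
lemma udSum_eq_keysum (counter : List (Int × Int)) (hnd : (counter.map Prod.fst).Nodup) (p : Int → Bool) :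
    ((counter.filter (fun q => p q.1)).map Prod.snd).sum
      = (((counter.map Prod.fst).filter p).map (fun k => (List.lookup k counter).getD 0)).sum := by
  induction counter with
  | nil => rfl
  | cons x t ih =>
    obtain ⟨x1, x2⟩ := x
    obtain ⟨hx, hnd'⟩ := List.nodup_cons.mp hnd
    have hlx : (List.lookup x1 ((x1, x2) :: t)).getD 0 = x2 := by simp [List.lookup]
    have htail : ((t.map Prod.fst).filter p).map (fun k => (List.lookup k ((x1, x2) :: t)).getD 0)
        = ((t.map Prod.fst).filter p).map (fun k => (List.lookup k t).getD 0) := by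
      apply List.map_congr_left
      intro k hk
      have hne : k ≠ x1 := fun h => hx (h ▸ List.mem_of_mem_filter hk)
      simp [List.lookup, beq_eq_false_iff_ne.mpr hne]
    by_cases hp : p x1 = true
    · rw [List.map_cons, List.filter_cons_of_pos (by simpa using hp),
          List.filter_cons_of_pos hp, List.map_cons, List.map_cons, List.sum_cons, List.sum_cons,
          hlx, htail, ih hnd']
    · rw [List.map_cons, List.filter_cons_of_neg (by simpa using hp),
          List.filter_cons_of_neg (by simpa using hp), htail, ih hnd']

-- min over a permutation of a strictly increasing list is its head
lemma ud_min_eq_head (l m : List Int) (hperm : l.Perm m) (hm : m.Pairwise (· < ·)) :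
    PySem.List.min? l (fun x => x) = m.head? := by
  cases m with
  | nil =>
    have : l = [] := hperm.eq_nil
    rw [this]
    rfl
  | cons m0 mt =>
    have hne : l ≠ [] := by
      intro h
      subst h
      exact List.cons_ne_nil m0 mt hperm.symm.eq_nil
    obtain ⟨x, hx⟩ : ∃ x, PySem.List.min? l (fun y => y) = some x := by
      cases h : PySem.List.min? l (fun y => y) with
      | none => exact absurd ((PySem.List.min?_eq_none_iff l _).mp h) hne
      | some x => exact ⟨x, rfl⟩
    have hxm : x ∈ m0 :: mt := hperm.mem_iff.mp (PySem.List.min?_mem hx)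
    have hm0 : x ≤ m0 := PySem.List.min?_isMin hx m0 (hperm.mem_iff.mpr List.mem_cons_self)
    have hxm0 : x = m0 := by
      rcases List.mem_cons.mp hxm with h | h
      · exact h
      · exact absurd hm0 (not_le.mpr ((List.pairwise_cons.mp hm).1 x h))
    rw [hx, hxm0]
    rfl

-- ===== VERDICT (by name: the statement is the Claim_ definition above) =====
theorem update_destances_spec : Claim_equal_update_destances := by
  intro counter k_dist _hdom hpre
  obtain ⟨hnd, _hex⟩ := hpre
  unfold Spec_update_destances update_destances update_destances_alt
  set keys := PySem.List.sorted (counter.map Prod.fst) (fun x => x) false with hkeys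
  have hperm : keys.Perm (counter.map Prod.fst) := PySem.List.sorted_perm _ _ _
  have hndk : keys.Nodup := hperm.nodup_iff.mpr hnd
  have hpw : keys.Pairwise (· < ·) := by
    have hle : keys.Pairwise (fun a b => a ≤ b) := PySem.List.sorted_pairwise _ _
    exact (hle.and hndk).imp (fun h => lt_of_le_of_ne h.1 h.2)
  have hlookv : ∀ k ∈ keys, List.lookup k counter = some ((List.lookup k counter).getD 0) := by
    intro k hk
    obtain ⟨w, hw⟩ := ud_lookup_isSome counter k (hperm.mem_iff.mp hk)
    simp [hw]
  have hsum : ∀ k, udB_sumLe counter k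
      = ((keys.filter (fun x => decide (x ≤ k))).map (fun k => (List.lookup k counter).getD 0)).sum := by
    intro k
    rw [udB_sumLe, udSum_eq_keysum counter hnd (fun x => decide (x ≤ k))]
    exact (((hperm.filter _).map _).sum_eq).symm
  have hA := udWalk_eq_head counter (fun k => (List.lookup k counter).getD 0) keys k_dist hpw hlookv
  have hcand : (counter.filter (fun p => decide (k_dist ≤ udB_sumLe counter p.1))).map Prod.fst
      = (counter.map Prod.fst).filter (fun k => decide (k_dist ≤ udB_sumLe counter k)) := by
    rw [List.filter_map]
    rfl
  have hfun : (fun k => decide (k_dist ≤ udB_sumLe counter k))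
      = (fun k => decide (k_dist ≤ ((keys.filter (fun x => decide (x ≤ k))).map
          (fun k => (List.lookup k counter).getD 0)).sum)) := by
    funext k
    rw [hsum k]
  have hB : PySem.List.min?
        ((counter.filter (fun p => decide (k_dist ≤ udB_sumLe counter p.1))).map Prod.fst)
        (fun x => x)
      = (keys.filter (fun k => decide (k_dist ≤ ((keys.filter (fun x => decide (x ≤ k))).map
          (fun k => (List.lookup k counter).getD 0)).sum))).head? := by
    apply ud_min_eq_head
    · rw [hcand, hfun]
      exact (hperm.filter _).symm
    · exact List.Pairwise.filter _ hpw
  show (udA_loop keys counter 0 k_dist (keys.length + 1)).getD 0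
      = (PySem.List.min? ((counter.filter (fun p => decide (k_dist ≤ udB_sumLe counter p.1))).map Prod.fst)
          (fun x => x)).getD 0
  rw [udA_loop_eq_walk keys counter (keys.length + 1) 0 k_dist (by omega), List.drop_zero,
    hA, hB]
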